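-- pv_equiv track=rewrite | github.com/pypa/packaging | packaging/metadata/_parse.py | _parse_project_urls
-- ===== SOURCE A (Python) =====
-- def _parse_project_urls(data: list[str]) -> dict[str, str]:
--     urls = {}
--     for pair in data:
--         # Our logic is slightly tricky here as we want to try and do
--         # *something* reasonable with malformed data.
--         #
--         # The main thing that we have to worry about, is data that does
--         # not have a ',' at all to split the Key from the Value. There
--         # isn't a singular right answer here, and we will fail validation
--         # later on (if the caller is validating) so it doesn't *really*
--         # matter, but since the missing value has to be an empty str
--         # and our return value is dict[str, str], if we let the key
--         # be the missing value, then they'd just multiple '' values that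
--         # overwrite each other.
--         #
--         # The other potentional issue is that it's possible to have the
--         # same Key multiple times in the metadata, with no solid "right"
--         # answer with what to do in that case, we'll do the only thing
--         # we can, which is treat the field as unparseable and add it
--         # to our list of unparsed fields.
--         parts = [p.strip() for p in pair.split(",", 1)]
--         parts.extend([""] * (max(0, 2 - len(parts))))  # Ensure 2 items
--
--         # TODO: The spec doesn't say anything about if the keys should be
--         #       considered case sensitive or not... logically they should
--         #       be case preserving, but case insensitive, but doing that
--         #       would open up more cases where we might have duplicated
--         #       entries.
--         label, url = parts
--         if label in urls:
--             # The label already exists in our set of urls, so this field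
--             # is unparseable, and we can just add the whole thing to our
--             # unparseable data and stop processing it.
--             raise KeyError("duplicate keys in project urls")
--         urls[label] = url
--
--     return urls
-- ===== SOURCE B (Python) =====
-- def _split_entry(item: str) -> tuple[str, str]:
--     head, sep, tail = item.partition(",")
--     return head.strip(), tail.strip() if sep else ""
--
--
-- def _parse_project_urls(data: list[str]) -> dict[str, str]:
--     # Phase 1: parse every entry into a (label, url) pair via str.partition.
--     pairs = [_split_entry(item) for item in data]
--     # Phase 2: sort the labels; any duplicate label is now adjacent, so one
--     # linear scan over neighbouring pairs detects it.
--     labels = sorted(label for label, _ in pairs)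
--     for x, y in zip(labels, labels[1:]):
--         if x == y:
--             raise KeyError("duplicate keys in project urls")
--     # Phase 3: construct the mapping in original order.
--     return dict(pairs)
-- ===== Notes on version B (the rewrite author's own statement) =====
-- stated objective: alternative
-- what changed: B parses entries with str.partition instead of split(',',1)+strip-map+padding, and detects duplicate labels by sorting the labels and scanning adjacent neighbours (sort-then-scan) instead of A's incremental dict-membership test, building the dict only afterwards in one dict(pairs) call.
import Mathlib
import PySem

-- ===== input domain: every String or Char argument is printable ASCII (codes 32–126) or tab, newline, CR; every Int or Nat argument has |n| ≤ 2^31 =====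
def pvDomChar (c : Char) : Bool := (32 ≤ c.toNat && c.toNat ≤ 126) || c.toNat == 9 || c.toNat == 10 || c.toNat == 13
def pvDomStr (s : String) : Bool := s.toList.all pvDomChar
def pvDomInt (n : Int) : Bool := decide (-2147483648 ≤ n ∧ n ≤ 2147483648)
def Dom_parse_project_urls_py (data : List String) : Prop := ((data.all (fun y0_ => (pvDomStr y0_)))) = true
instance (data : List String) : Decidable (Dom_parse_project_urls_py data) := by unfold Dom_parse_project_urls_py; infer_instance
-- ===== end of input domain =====

-- B parses each entry with str.partition and detects duplicate labels by SORTING the labels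
-- and scanning adjacent neighbours, building the dict afterwards (alternative decomposition;
-- equivalence on inputs without duplicate labels, on which both programs raise KeyError).


-- ===== PORT A =====
-- the loop of A; 'raise KeyError' on a duplicate label is modelled as `none`
def parse_project_urls_py_go (urls : PySem.Dict String String) : List String → Option (PySem.Dict String String)
  | [] => some urls
  | pair :: rest =>
      let parts0 := ((PySem.Str.splitMax? pair "," 1).getD []).map PySem.Str.strip
      let parts := parts0 ++ List.replicate (2 - parts0.length) ""   -- parts.extend([""] * max(0, 2 - len(parts)))
      -- 'label, url = parts': parts always has length exactly 2 here (split with maxsplit=1, then padded)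
      let label := parts.headD ""
      let url := parts.getD 1 ""
      if urls.contains label then none
      else parse_project_urls_py_go (urls.insert label url) rest

def parse_project_urls_py (data : List String) : List (String × String) :=
  match parse_project_urls_py_go PySem.Dict.empty data with
  | some urls => urls.items
  | none => []          -- KeyError("duplicate keys in project urls"); excluded by Pre_

-- ===== PORT B =====
-- item.partition(",") — exact port of str.partition for the single-character separator ','
def pvPartitionComma : List Char → List Char × Bool × List Char
  | [] => ([], false, [])
  | c :: rest =>
      if c = ',' then ([], true, rest)
      else
        let (h, found, t) := pvPartitionComma rest
        (c :: h, found, t)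

-- _split_entry: (head.strip(), tail.strip() if sep else "")
def pvParsePair (s : String) : String × String :=
  let (head, sep, tail) := pvPartitionComma s.toList
  (PySem.Str.strip (String.ofList head),
   if sep then PySem.Str.strip (String.ofList tail) else "")

-- the 'for x, y in zip(labels, labels[1:]): if x == y: raise' scan
def pvAdjDup : List String → Bool
  | [] => false
  | [_] => false
  | x :: y :: rest => if x == y then true else pvAdjDup (y :: rest)

def parse_project_urls_py_alt (data : List String) : List (String × String) :=
  let pairs := data.map pvParsePair
  let labels := PySem.List.sorted (pairs.map (·.1)) (fun x => x) false
  if pvAdjDup labels then []   -- KeyError("duplicate keys in project urls"); excluded by Pre_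
  else (PySem.Dict.ofList pairs).items

-- ===== PRECONDITION & SPEC =====
-- the label of an entry: everything before the first ',' (the whole entry if none), stripped
def pvLabel (s : String) : String :=
  PySem.Str.strip (String.ofList (s.toList.takeWhile (· ≠ ',')))

-- Pre_ excludes exactly the inputs with a duplicate label, on which A raises KeyError (and so does B)
def Pre_parse_project_urls_py (data : List String) : Prop := (data.map pvLabel).Nodup
instance (data : List String) : Decidable (Pre_parse_project_urls_py data) := by
  unfold Pre_parse_project_urls_py; infer_instance

def pvWitness_parse_project_urls_py : List String :=
  ["Homepage, https://example.com", "Docs , https://docs.example.com", "nocomma"]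

def Spec_parse_project_urls_py (data : List String) (out : List (String × String)) : Prop := out = parse_project_urls_py_alt data
instance (data : List String) (out : List (String × String)) : Decidable (Spec_parse_project_urls_py data out) := by unfold Spec_parse_project_urls_py; infer_instance

-- ===== CLAIM (what is proved, stated in full; the proofs are below) =====
def Claim_equal_parse_project_urls_py : Prop := ∀ (data : List String), Dom_parse_project_urls_py data → Pre_parse_project_urls_py data → Spec_parse_project_urls_py data (parse_project_urls_py data)

-- ===== LEMMAS AND PROOFS =====

-- characterisation of pvPartitionComma by takeWhile/dropWhile
theorem pvPartitionComma_eq (cs : List Char) :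
    pvPartitionComma cs =
      (cs.takeWhile (· ≠ ','), decide ((',' : Char) ∈ cs), (cs.dropWhile (· ≠ ',')).tail) := by
  induction cs with
  | nil => simp [pvPartitionComma]
  | cons c rest ih =>
      by_cases h : c = ','
      · simp [pvPartitionComma, h, List.takeWhile, List.dropWhile]
      · simp [pvPartitionComma, h, ih, List.takeWhile, List.dropWhile, Ne.symm h]

-- split(",", 1) characterised via the same takeWhile/dropWhile decomposition
theorem splitOnMax_go_comma (cs : List Char) : ∀ (fuel : Nat), cs.length < fuel →
    ∀ (cur : List Char) (acc : List (List Char)),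
    PySem.Chars.splitOnMax.go [','] fuel 1 cs cur acc =
      (if (',' : Char) ∈ cs then
        ((cs.dropWhile (· ≠ ',')).tail :: (cur.reverse ++ cs.takeWhile (· ≠ ',')) :: acc)
      else ((cur.reverse ++ cs) :: acc)).reverse := by
  induction cs with
  | nil =>
      intro fuel hf cur acc
      match fuel, hf with
      | fuel + 1, _ => simp [PySem.Chars.splitOnMax.go]
  | cons c rest ih =>
      intro fuel hf cur acc
      match fuel, hf with
      | fuel + 1, hf =>
        by_cases h : c = ','
        · subst h
          have hgo0 : ∀ (f : Nat) (l : List Char) (a : List (List Char)),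
              PySem.Chars.splitOnMax.go [','] f 0 l [] a = (l :: a).reverse := by
            intro f l a
            match f, l with
            | 0, l => simp [PySem.Chars.splitOnMax.go]
            | f + 1, [] => simp [PySem.Chars.splitOnMax.go]
            | f + 1, x :: l => simp [PySem.Chars.splitOnMax.go]
          simp [PySem.Chars.splitOnMax.go, List.isPrefixOf, hgo0, List.dropWhile, List.takeWhile]
        · have hpre : [','].isPrefixOf (c :: rest) = false := by
            simp [List.isPrefixOf]; exact fun hh => h hh.symm
          have hlen : rest.length < fuel := by
            simpa [List.length_cons, Nat.succ_lt_succ_iff] using hf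
          simp only [PySem.Chars.splitOnMax.go, hpre]
          rw [if_neg (by omega : ¬ (1 : Nat) = 0)]
          simp only [Bool.false_eq_true, if_false, ih fuel hlen]
          simp [List.takeWhile, List.dropWhile, h, Ne.symm h]

theorem splitMax_comma (s : String) :
    ((PySem.Str.splitMax? s "," 1).getD []) =
      if (',' : Char) ∈ s.toList then
        [String.ofList (s.toList.takeWhile (· ≠ ',')),
         String.ofList ((s.toList.dropWhile (· ≠ ',')).tail)]
      else [String.ofList s.toList] := by
  have h := splitOnMax_go_comma s.toList (s.length + 1) (by simp) [] []
  have hsep : (",").toList = [','] := rfl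
  simp only [PySem.Str.splitMax?, PySem.Chars.splitMax?, PySem.Chars.splitOnMax, hsep]
  by_cases hc : (',' : Char) ∈ s.toList <;>
    simp [h, hc, Int.toNat, decide_not]

-- the two per-entry parses agree
theorem parsePair_eq (s : String) :
    pvParsePair s =
      (let parts0 := ((PySem.Str.splitMax? s "," 1).getD []).map PySem.Str.strip
       let parts := parts0 ++ List.replicate (2 - parts0.length) ""
       (parts.headD "", parts.getD 1 "")) := by
  simp only [pvParsePair, pvPartitionComma_eq, splitMax_comma]
  by_cases hc : (',' : Char) ∈ s.toList
  · simp [hc, PySem.Str.strip]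
  · have htw : s.toList.takeWhile (fun x => !decide (x = ',')) = s.toList := by
      rw [List.takeWhile_eq_self_iff]
      intro c hcm
      simp only [Bool.not_eq_eq_eq_not, Bool.not_true, decide_eq_false_iff_not]
      rintro rfl; exact hc hcm
    simp [hc, PySem.Str.strip, htw]

-- the two components of A's per-entry parse, as rewrite rules
theorem parseA_fst (s : String) :
    (List.map PySem.Str.strip ((PySem.Str.splitMax? s "," 1).getD []) ++
      List.replicate (2 - (List.map PySem.Str.strip ((PySem.Str.splitMax? s "," 1).getD [])).length) "").headD ""
      = (pvParsePair s).1 := by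
  rw [parsePair_eq]

theorem parseA_snd (s : String) :
    (List.map PySem.Str.strip ((PySem.Str.splitMax? s "," 1).getD []) ++
      List.replicate (2 - (List.map PySem.Str.strip ((PySem.Str.splitMax? s "," 1).getD [])).length) "").getD 1 ""
      = (pvParsePair s).2 := by
  rw [parsePair_eq]

-- B's label is the first component of the per-entry parse
theorem parsePair_fst (s : String) : (pvParsePair s).1 = pvLabel s := by
  simp [pvParsePair, pvPartitionComma_eq, pvLabel]

-- a list without duplicates has no equal adjacent neighbours (regardless of order)
theorem pvAdjDup_eq_false_of_nodup : ∀ (l : List String), l.Nodup → pvAdjDup l = false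
  | [], _ => rfl
  | [_], _ => rfl
  | x :: y :: rest, h => by
      have hxy : x ≠ y := by simp at h; exact h.1.1
      have htl : (y :: rest).Nodup := h.of_cons
      simp [pvAdjDup, hxy, pvAdjDup_eq_false_of_nodup (y :: rest) htl]

-- A's loop over fresh, pairwise-distinct labels is a plain fold of inserts
theorem goA_eq_foldl (data : List String) : ∀ (urls : PySem.Dict String String),
    (data.map (fun s => (pvParsePair s).1)).Nodup →
    (∀ s ∈ data, urls.contains (pvParsePair s).1 = false) →
    parse_project_urls_py_go urls data =
      some (data.foldl (fun d s => d.insert (pvParsePair s).1 (pvParsePair s).2) urls) := by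
  induction data with
  | nil => intro urls _ _; rfl
  | cons pair rest ih =>
      intro urls hnd hfresh
      simp only [parse_project_urls_py_go, parseA_fst, parseA_snd]
      rw [hfresh pair (List.mem_cons_self ..)]
      simp only [Bool.false_eq_true, if_false, List.foldl_cons]
      have hnd' : (∀ x ∈ rest, ¬(pvParsePair x).1 = (pvParsePair pair).1) ∧
          (List.map (fun s => (pvParsePair s).1) rest).Nodup := by
        simpa using hnd
      apply ih
      · exact hnd'.2
      · intro s hs
        rw [PySem.Dict.contains_insert]
        simp [hnd'.1 s hs, hfresh s (List.mem_cons_of_mem _ hs)]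

-- ===== VERDICT (by name: the statement is the Claim_ definition above) =====
theorem parse_project_urls_py_spec : Claim_equal_parse_project_urls_py := by
  intro data _hdom hpre
  unfold Spec_parse_project_urls_py
  have hnd : (data.map (fun s => (pvParsePair s).1)).Nodup := by
    have he : data.map (fun s => (pvParsePair s).1) = data.map pvLabel := by
      simp [parsePair_fst]
    rw [he]; exact hpre
  -- A side
  have hA := goA_eq_foldl data PySem.Dict.empty hnd
    (fun s _ => PySem.Dict.contains_empty _)
  have hitemsA :
      (data.foldl (fun d s => d.insert (pvParsePair s).1 (pvParsePair s).2) PySem.Dict.empty).items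
        = data.map (fun s => ((pvParsePair s).1, (pvParsePair s).2)) := by
    have := PySem.Dict.items_foldl_insert_fresh data
      (fun s => (pvParsePair s).1) (fun s => (pvParsePair s).2) PySem.Dict.empty
      (fun s _ => PySem.Dict.contains_empty _) hnd
    simpa using this
  -- B side: the sorted label list is a permutation of a Nodup list, hence Nodup,
  -- hence the adjacent-neighbour scan finds nothing
  have hndB : ((data.map pvParsePair).map (·.1)).Nodup := by
    simpa [Function.comp] using hnd
  have hsortnd : (PySem.List.sorted ((data.map pvParsePair).map (·.1)) (fun x => x) false).Nodup :=
    (PySem.List.sorted_perm ((data.map pvParsePair).map (·.1)) (fun x => x) false).nodup_iff.mpr hndB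
  have hadj := pvAdjDup_eq_false_of_nodup _ hsortnd
  have hitemsB : (PySem.Dict.ofList (data.map pvParsePair)).items = data.map pvParsePair := by
    have := PySem.Dict.items_foldl_insert_fresh (data.map pvParsePair)
      Prod.fst Prod.snd (PySem.Dict.empty (κ := String) (ν := String))
      (fun p _ => PySem.Dict.contains_empty _) (by simpa [Function.comp] using hndB)
    simpa [PySem.Dict.ofList, PySem.Dict.update] using this
  simp only [parse_project_urls_py, hA]
  simp only [parse_project_urls_py_alt]
  rw [hadj]
  simp only [Bool.false_eq_true, if_false]
  rw [hitemsA, hitemsB]
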